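-- pv_equiv track=rewrite | github.com/kuboon/math_braid.py | math_braid/extras/presentation.py | simplifyWord
-- ===== SOURCE A (Python) =====
-- def simplifyWord(word):
--     """
--     Perform cancellations in a word.
--
--     Input word should be a list of integers;
--         [1, 1, -2] means x_1^2 x_2^{-1}
--
--     """
--     not_stuck = True
--     while not_stuck:
--         not_stuck = False
--         prev = None
--         new_word = []
--         for x in word:
--             if prev == -x:
--                 prev = None
--                 not_stuck = True
--             else:
--                 if prev is not None:
--                     new_word.append(prev)
--                 prev = x
--         # Make sure we get the last letter in too
--         if prev is not None:
--             new_word.append(prev)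
--         word = new_word
--     return word
-- ===== SOURCE B (Python) =====
-- def simplifyWord(word):
--     """Fully cancel adjacent inverse letters with a single-pass stack."""
--     stack = []
--     for x in word:
--         if stack and stack[-1] == -x:
--             stack.pop()
--         else:
--             stack.append(x)
--     return stack
-- ===== Notes on version B (the rewrite author's own statement) =====
-- stated objective: alternative
-- what changed: Replaces repeated full cancellation passes until a fixpoint with a single-pass stack that pops the top when it is the negation of the next letter.
import Mathlib
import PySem

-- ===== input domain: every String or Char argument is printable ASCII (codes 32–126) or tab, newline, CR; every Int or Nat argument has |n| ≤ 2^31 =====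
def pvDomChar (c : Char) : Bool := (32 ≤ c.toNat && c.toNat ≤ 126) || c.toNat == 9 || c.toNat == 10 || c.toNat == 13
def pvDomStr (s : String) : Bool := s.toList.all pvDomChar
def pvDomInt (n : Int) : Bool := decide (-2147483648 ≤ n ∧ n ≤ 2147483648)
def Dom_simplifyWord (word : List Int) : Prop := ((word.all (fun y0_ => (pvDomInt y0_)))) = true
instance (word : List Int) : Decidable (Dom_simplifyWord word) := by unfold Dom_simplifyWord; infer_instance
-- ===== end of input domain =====

-- B changes the algorithm: a single left-to-right stack pass (pop on inverse top)
-- instead of A's repeated full cancellation passes until a fixpoint.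

-- ===== PORT A =====
-- One step of A's inner `for x in word` loop; state = (not_stuck, prev, new_word).
def passStep (st : Bool × Option Int × List Int) (x : Int) : Bool × Option Int × List Int :=
  match st with
  | (ns, prev, nw) =>
    if prev = some (-x) then (true, none, nw)
    else match prev with
      | none => (ns, some x, nw)
      | some p => (ns, some x, nw ++ [p])

-- One whole pass of A's while-loop body: run the for-loop, then append the last `prev`.
def passA (word : List Int) : Bool × List Int :=
  match word.foldl passStep (false, none, []) with
  | (ns, none, nw) => (ns, nw)
  | (ns, some p, nw) => (ns, nw ++ [p])

-- Proof-helper recursion used only to justify termination of the while loop: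
-- `Gf prev xs` is the (flag, emitted word) of one pass starting with pending letter `prev`.
def Gf : Option Int → List Int → Bool × List Int
  | prev, [] => (false, match prev with | none => [] | some p => [p])
  | prev, x :: xs =>
    if prev = some (-x) then (true, (Gf none xs).2)
    else match prev with
      | none => Gf (some x) xs
      | some p => ((Gf (some x) xs).1, p :: (Gf (some x) xs).2)

def moLen : Option Int → Nat
  | none => 0
  | some _ => 1

lemma Gf_cancel {prev : Option Int} (x : Int) (xs : List Int) (h : prev = some (-x)) :
    Gf prev (x :: xs) = (true, (Gf none xs).2) := by
  simp [Gf, h]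

lemma Gf_push (p x : Int) (xs : List Int) (h : ¬ (some p = some (-x))) :
    Gf (some p) (x :: xs) = ((Gf (some x) xs).1, p :: (Gf (some x) xs).2) := by
  simp only [Gf, if_neg h]

lemma Gf_none (x : Int) (xs : List Int) :
    Gf none (x :: xs) = Gf (some x) xs := by
  simp [Gf]

lemma Gf_foldl (xs : List Int) : ∀ (ns : Bool) (prev : Option Int) (nw : List Int),
    (match xs.foldl passStep (ns, prev, nw) with
      | (ns', none, nw') => (ns', nw')
      | (ns', some p, nw') => (ns', nw' ++ [p]))
    = (ns || (Gf prev xs).1, nw ++ (Gf prev xs).2) := by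
  induction xs with
  | nil =>
    intro ns prev nw
    cases prev <;> simp [Gf]
  | cons x xs ih =>
    intro ns prev nw
    by_cases h : prev = some (-x)
    · rw [Gf_cancel x xs h]
      simp [List.foldl_cons, passStep, h, ih]
    · cases prev with
      | none => simp [List.foldl_cons, passStep, h, Gf_none, ih]
      | some p =>
        rw [Gf_push _ _ _ h]
        simp only [List.foldl_cons, passStep, if_neg h, ih]
        simp

lemma passA_eq_Gf (word : List Int) : passA word = Gf none word := by
  unfold passA
  rw [Gf_foldl word false none []]
  simp

lemma Gf_len (xs : List Int) : ∀ (prev : Option Int),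
    ((Gf prev xs).1 = false → (Gf prev xs).2.length = moLen prev + xs.length) ∧
    ((Gf prev xs).1 = true → (Gf prev xs).2.length + 2 ≤ moLen prev + xs.length) := by
  induction xs with
  | nil =>
    intro prev; cases prev <;> simp [Gf, moLen]
  | cons x xs ih =>
    intro prev
    by_cases h : prev = some (-x)
    · rw [Gf_cancel x xs h]
      subst h
      constructor
      · intro hf; simp at hf
      · intro _
        simp only [moLen, List.length_cons]
        rcases Bool.eq_false_or_eq_true (Gf none xs).1 with hb | hb
        · have := (ih none).2 hb; simp [moLen] at this; omega
        · have := (ih none).1 hb; simp [moLen] at this; omega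
    · cases prev with
      | none =>
        rw [Gf_none]
        have := ih (some x)
        constructor
        · intro hf; have := this.1 hf; simp [moLen] at this ⊢; omega
        · intro ht; have := this.2 ht; simp [moLen] at this ⊢; omega
      | some p =>
        rw [Gf_push _ _ _ h]
        have := ih (some x)
        constructor
        · intro hf
          have := this.1 hf
          simp [moLen] at this ⊢; omega
        · intro ht
          have := this.2 ht
          simp [moLen] at this ⊢; omega

lemma passA_true_len (word : List Int) (h : (passA word).1 = true) :
    (passA word).2.length < word.length := by
  rw [passA_eq_Gf] at h ⊢
  have := (Gf_len word none).2 h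
  simp [moLen] at this
  omega

-- A: repeat passes while a cancellation happened; terminates because a
-- cancelling pass strictly shortens the word.
def simplifyWord (word : List Int) : List Int :=
  let r := passA word
  if h : r.1 = true then simplifyWord r.2 else r.2
termination_by word.length
decreasing_by exact passA_true_len word h

-- ===== PORT B =====
-- One step of B's loop: `if stack and stack[-1] == -x: stack.pop() else: stack.append(x)`.
def altStep (stack : List Int) (x : Int) : List Int :=
  if stack.getLast? = some (-x) then stack.dropLast else stack ++ [x]

def simplifyWord_alt (word : List Int) : List Int :=
  word.foldl altStep []

-- ===== PRECONDITION & SPEC =====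
def Spec_simplifyWord (word : List Int) (out : List Int) : Prop := out = simplifyWord_alt word
instance (word : List Int) (out : List Int) : Decidable (Spec_simplifyWord word out) := by unfold Spec_simplifyWord; infer_instance

-- ===== CLAIM (what is proved, stated in full; the proofs are below) =====
def Claim_equal_simplifyWord : Prop := ∀ (word : List Int), Dom_simplifyWord word → Spec_simplifyWord word (simplifyWord word)

-- ===== LEMMAS AND PROOFS =====

-- Front-of-list version of B's stack step (stack kept reversed, top first).
def fstep (s : List Int) (x : Int) : List Int :=
  if s.head? = some (-x) then s.tail else x :: s

lemma altStep_rev (l : List Int) (x : Int) : altStep l.reverse x = (fstep l x).reverse := by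
  cases l with
  | nil => simp [altStep, fstep]
  | cons t r =>
    by_cases h : t = -x
    · simp [altStep, fstep, h]
    · have h' : ¬ ((t :: r).head? = some (-x)) := by simp [h]
      simp [altStep, fstep, h', h]

lemma foldl_altStep_rev (xs : List Int) : ∀ (l : List Int),
    xs.foldl altStep l.reverse = (xs.foldl fstep l).reverse := by
  induction xs with
  | nil => intro l; simp
  | cons x xs ih => intro l; simp only [List.foldl_cons, altStep_rev, ih]

-- No two adjacent entries of the list are mutual inverses.
def NoCancel : List Int → Prop
  | [] => True
  | [_] => True
  | a :: b :: r => b ≠ -a ∧ NoCancel (b :: r)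

lemma NoCancel_tail {a : Int} {r : List Int} (h : NoCancel (a :: r)) : NoCancel r := by
  cases r with
  | nil => trivial
  | cons b r' => exact h.2

lemma NoCancel_fstep {s : List Int} (x : Int) (h : NoCancel s) : NoCancel (fstep s x) := by
  cases s with
  | nil => simp [fstep, NoCancel]
  | cons t r =>
    by_cases ht : t = -x
    · have : fstep (t :: r) x = r := by simp [fstep, ht]
      rw [this]
      exact NoCancel_tail h
    · have h' : ¬ ((t :: r).head? = some (-x)) := by simp [ht]
      rw [fstep, if_neg h']
      exact ⟨by intro he; exact ht (by omega), h⟩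

lemma fstep_cancel {s : List Int} (a : Int) (h : NoCancel s) :
    fstep (fstep s a) (-a) = s := by
  cases s with
  | nil => simp [fstep]
  | cons t r =>
    by_cases ht : t = -a
    · have h1 : fstep (t :: r) a = r := by simp [fstep, ht]
      rw [h1]
      cases r with
      | nil => simp [fstep, ht]
      | cons u r' =>
        have hu : u ≠ -t := h.1
        have hcond : ¬ ((u :: r').head? = some (- -a)) := by
          simp only [List.head?_cons, Option.some.injEq, neg_neg]
          intro he
          exact hu (by omega)
        rw [fstep, if_neg hcond, ht]
    · have h' : ¬ ((t :: r).head? = some (-a)) := by simp [ht]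
      have h1 : fstep (t :: r) a = a :: t :: r := by rw [fstep, if_neg h']
      rw [h1]
      simp [fstep]

def pushOpt (prev : Option Int) (s : List Int) : List Int :=
  match prev with
  | none => s
  | some p => fstep s p

-- One pass of A does not change the stack that B's fold computes.
lemma Gf_red (xs : List Int) : ∀ (prev : Option Int) (s : List Int), NoCancel s →
    (Gf prev xs).2.foldl fstep s = xs.foldl fstep (pushOpt prev s) := by
  induction xs with
  | nil =>
    intro prev s _; cases prev <;> simp [Gf, pushOpt, fstep]
  | cons x xs ih =>
    intro prev s hs
    by_cases h : prev = some (-x)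
    · rw [Gf_cancel x xs h]
      subst h
      simp only [pushOpt, List.foldl_cons]
      rw [ih none s hs]
      have : fstep (fstep s (-x)) x = s := by
        have := fstep_cancel (s := s) (-x) hs
        simpa using this
      rw [this]
      rfl
    · cases prev with
      | none =>
        rw [Gf_none]
        simpa [pushOpt] using ih (some x) s hs
      | some p =>
        rw [Gf_push _ _ _ h]
        simp only [pushOpt, List.foldl_cons]
        exact ih (some x) (fstep s p) (NoCancel_fstep p hs)

def optList : Option Int → List Int
  | none => []
  | some p => [p]

-- A pass that found no cancellation reproduces its input …
lemma Gf_noflag (xs : List Int) : ∀ (prev : Option Int),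
    (Gf prev xs).1 = false → (Gf prev xs).2 = optList prev ++ xs := by
  induction xs with
  | nil => intro prev _; cases prev <;> simp [Gf, optList]
  | cons x xs ih =>
    intro prev hf
    by_cases h : prev = some (-x)
    · rw [Gf_cancel x xs h] at hf; simp at hf
    · cases prev with
      | none =>
        rw [Gf_none] at hf ⊢
        simpa [optList] using ih (some x) hf
      | some p =>
        rw [Gf_push _ _ _ h] at hf ⊢
        rw [ih (some x) hf]
        simp [optList]

-- … and that input has no adjacent inverse pair left.
lemma Gf_reduced (xs : List Int) : ∀ (prev : Option Int),
    (Gf prev xs).1 = false → NoCancel (optList prev ++ xs) := by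
  induction xs with
  | nil => intro prev _; cases prev <;> simp [optList, NoCancel]
  | cons x xs ih =>
    intro prev hf
    by_cases h : prev = some (-x)
    · rw [Gf_cancel x xs h] at hf; simp at hf
    · cases prev with
      | none =>
        rw [Gf_none] at hf
        simpa [optList] using ih (some x) hf
      | some p =>
        rw [Gf_push _ _ _ h] at hf
        have hrest := ih (some x) hf
        simp only [optList, List.singleton_append] at hrest ⊢
        refine ⟨?_, hrest⟩
        intro he
        apply h
        rw [he]
        simp


def HeadOK : List Int → List Int → Prop
  | t :: _, x :: _ => t ≠ -x
  | _, _ => True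

-- Running B's stack over an already reduced word just reverses it onto the stack.
lemma foldl_fstep_nc : ∀ (w s : List Int), NoCancel w → HeadOK s w →
    w.foldl fstep s = w.reverse ++ s := by
  intro w
  induction w with
  | nil => intro s _ _; simp
  | cons x xs ih =>
    intro s hc hhd
    have hpush : fstep s x = x :: s := by
      cases s with
      | nil => simp [fstep]
      | cons t r =>
        have ht : t ≠ -x := hhd
        have : ¬ ((t :: r).head? = some (-x)) := by simp [ht]
        rw [fstep, if_neg this]
    rw [List.foldl_cons, hpush, ih (x :: s) (NoCancel_tail hc) ?_]
    · simp
    · cases xs with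
      | nil => trivial
      | cons y ys =>
        have : y ≠ -x := hc.1
        show x ≠ -y
        intro he; exact this (by omega)

-- Main induction: A's fixpoint iteration computes B's single-pass stack result.
lemma simplify_eq_red (n : Nat) : ∀ (word : List Int), word.length ≤ n →
    simplifyWord word = (word.foldl fstep []).reverse := by
  induction n with
  | zero =>
    intro word hlen
    have hnil : word = [] := by cases word <;> simp_all
    subst hnil
    rw [simplifyWord]
    norm_num [passA]
  | succ n ih =>
    intro word hlen
    rw [simplifyWord]
    by_cases h : (passA word).1 = true
    · rw [dif_pos h]
      have hlt := passA_true_len word h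
      rw [ih (passA word).2 (by omega)]
      rw [passA_eq_Gf]
      rw [Gf_red word none [] (by trivial)]
      rfl
    · rw [dif_neg h]
      have hf : (Gf none word).1 = false := by
        rw [passA_eq_Gf] at h
        simpa using h
      have hw : (passA word).2 = word := by
        rw [passA_eq_Gf, Gf_noflag word none hf]; simp [optList]
      have hred : NoCancel word := by
        simpa [optList] using Gf_reduced word none hf
      rw [hw, foldl_fstep_nc word [] hred (by cases word <;> trivial)]
      simp

-- ===== VERDICT (by name: the statement is the Claim_ definition above) =====
theorem simplifyWord_spec : Claim_equal_simplifyWord := by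
  intro word _
  unfold Spec_simplifyWord simplifyWord_alt
  rw [show ([] : List Int) = ([] : List Int).reverse by simp, foldl_altStep_rev]
  exact simplify_eq_red word.length word (le_refl _)
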